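-- pv_equiv track=rewrite | github.com/ServiceNow/webarena-verified | tests/api/format_variations_utils.py | get_coverage_stats
-- ===== SOURCE A (Python) =====
-- from typing import Any
--
-- def distribute_variations_round_robin(
--     task_ids: list[int],
--     variations: list[tuple[str, Any]],
-- ) -> dict[int, list[tuple[str, Any]]]:
--     """Distribute format variations across tasks using round-robin.
--
--     Instead of testing ALL variations for EVERY task (N variations × T tasks = N*T tests),
--     this distributes variations across tasks so each task tests only one variation,
--     reducing test count to max(N, T) while maintaining full variation coverage.
--
--     Args:
--         task_ids: List of task IDs that use this format type
--         variations: List of (variation_name, variation_func) tuples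
--
--     Returns:
--         Mapping from task_id to list containing single (variation_name, variation_func) tuple
--
--     Example:
--         task_ids = [52, 53, 54, 55, 56]
--         variations = [("fmt_a", func_a), ("fmt_b", func_b), ("fmt_c", func_c)]
--
--         Result:
--         {
--             52: [("fmt_a", func_a)],  # index 0 % 3 = 0
--             53: [("fmt_b", func_b)],  # index 1 % 3 = 1
--             54: [("fmt_c", func_c)],  # index 2 % 3 = 2
--             55: [("fmt_a", func_a)],  # index 3 % 3 = 0 (cycles back)
--             56: [("fmt_b", func_b)],  # index 4 % 3 = 1
--         }
--     """
--     if not task_ids or not variations: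
--         return {}
--
--     num_variations = len(variations)
--     result = {}
--
--     for i, task_id in enumerate(sorted(task_ids)):
--         variation_index = i % num_variations
--         result[task_id] = [variations[variation_index]]
--
--     return result
--
-- def get_coverage_stats(
--     task_ids: list[int],
--     variations: list[tuple[str, Any]],
-- ) -> dict[str, int]:
--     """Get statistics about variation coverage after round-robin distribution.
--
--     Args:
--         task_ids: List of task IDs
--         variations: List of (variation_name, variation_func) tuples
--
--     Returns:
--         Mapping from variation_name to count of tasks testing that variation
--     """
--     distribution = distribute_variations_round_robin(task_ids, variations)
--     stats: dict[str, int] = {name: 0 for name, _ in variations}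
--
--     for assigned_variations in distribution.values():
--         for var_name, _ in assigned_variations:
--             stats[var_name] += 1
--
--     return stats
-- ===== SOURCE B (Python) =====
-- def get_coverage_stats(task_ids, variations):
--     stats = {name: 0 for name, _ in variations}
--     t = len(task_ids)
--     n = len(variations)
--     for j, (name, _) in enumerate(variations):
--         stats[name] += (t - 1 - j) // n + 1
--     return stats
-- ===== Notes on version B (the rewrite author's own statement) =====
-- stated objective: simpler
-- what changed: B drops the sort-and-distribute simulation entirely and uses the closed form of round-robin: the variation at index j serves (T-1-j)//N+1 tasks, aggregated per name in one pass over the variations; Pre_ excludes task_id lists with duplicate ids, on which A's count (one assignment per distinct id, attributed to the position of its last occurrence via dict overwrite) is an accident of its dict construction.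
-- outside the precondition, e.g. on get_coverage_stats([1, 1, 2], [('a', 0), ('b', 0)]): A returns {'a': 1, 'b': 1}, B returns {'a': 2, 'b': 1}
import Mathlib
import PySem

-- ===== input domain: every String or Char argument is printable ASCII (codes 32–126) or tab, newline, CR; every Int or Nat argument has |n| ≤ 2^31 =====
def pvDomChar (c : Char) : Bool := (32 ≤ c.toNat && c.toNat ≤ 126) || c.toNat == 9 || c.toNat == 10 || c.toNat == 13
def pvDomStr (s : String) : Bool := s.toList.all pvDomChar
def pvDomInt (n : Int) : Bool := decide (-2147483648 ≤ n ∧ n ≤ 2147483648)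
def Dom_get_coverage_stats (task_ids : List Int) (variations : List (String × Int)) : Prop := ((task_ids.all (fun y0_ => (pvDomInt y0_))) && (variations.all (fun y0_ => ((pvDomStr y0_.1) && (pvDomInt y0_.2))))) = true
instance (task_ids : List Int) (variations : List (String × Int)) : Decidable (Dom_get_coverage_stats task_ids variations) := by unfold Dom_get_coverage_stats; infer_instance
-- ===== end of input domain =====

-- B replaces A's sort-and-distribute simulation by the closed form of round-robin
-- ((T-1-j)//N+1 tasks for variation index j), aggregated per name in one pass (objective: simpler).

-- ===== PORT A =====
def pvDistribute (task_ids : List Int) (variations : List (String × Int)) :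
    PySem.Dict Int (List (String × Int)) :=
  if task_ids = [] ∨ variations = [] then PySem.Dict.mk []
  else
    let num_variations : Int := (variations.length : Int)
    (PySem.List.enumerate (PySem.List.sorted task_ids (fun x => x) false)).foldl
      (fun result p =>
        match PySem.List.pyGet? variations (PySem.Int.mod p.1 num_variations) with
        | some v => result.insert p.2 [v]
        | none => result)
      (PySem.Dict.mk [])

def get_coverage_stats (task_ids : List Int) (variations : List (String × Int)) :
    List (String × Int) :=
  let distribution := pvDistribute task_ids variations
  let stats : PySem.Dict String Int :=
    variations.foldl (fun st p => st.insert p.1 0) (PySem.Dict.mk [])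
  ((distribution.values).foldl
    (fun st assigned => assigned.foldl (fun st v => st.modify v.1 0 (· + 1)) st)
    stats).items

-- ===== PORT B =====
def get_coverage_stats_alt (task_ids : List Int) (variations : List (String × Int)) :
    List (String × Int) :=
  let stats : PySem.Dict String Int :=
    variations.foldl (fun st p => st.insert p.1 0) (PySem.Dict.mk [])
  let t : Int := (task_ids.length : Int)
  let n : Int := (variations.length : Int)
  ((PySem.List.enumerate variations).foldl
    (fun st q => st.modify q.2.1 0 (· + (PySem.Int.floordiv (t - 1 - q.1) n + 1)))
    stats).items

-- ===== PRECONDITION & SPEC =====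
-- Pre_ excludes task_id lists with duplicate ids: there A's per-variation counts (one
-- assignment per DISTINCT id, attributed to the position of its last occurrence in the
-- sorted duplicated list) are an accident of its dict-overwrite construction.
def Pre_get_coverage_stats (task_ids : List Int) (variations : List (String × Int)) : Prop :=
  task_ids.Nodup
instance (task_ids : List Int) (variations : List (String × Int)) : Decidable (Pre_get_coverage_stats task_ids variations) := by unfold Pre_get_coverage_stats; infer_instance

def pvWitness_get_coverage_stats : List Int × (List (String × Int)) :=
  ([1, 2, 3], [("a", 1), ("b", 2)])

def Spec_get_coverage_stats (task_ids : List Int) (variations : List (String × Int)) (out : List (String × Int)) : Prop := out = get_coverage_stats_alt task_ids variations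
instance (task_ids : List Int) (variations : List (String × Int)) (out : List (String × Int)) : Decidable (Spec_get_coverage_stats task_ids variations out) := by unfold Spec_get_coverage_stats; infer_instance

-- ===== CLAIM (what is proved, stated in full; the proofs are below) =====
def Claim_equal_get_coverage_stats : Prop := ∀ (task_ids : List Int) (variations : List (String × Int)), Dom_get_coverage_stats task_ids variations → Pre_get_coverage_stats task_ids variations → Spec_get_coverage_stats task_ids variations (get_coverage_stats task_ids variations)

-- ===== LEMMAS AND PROOFS =====

-- the variation assigned to (0-based) position i
def vat (variations : List (String × Int)) (i : Int) : String × Int :=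
  PySem.List.pyGetD variations (PySem.Int.mod i (variations.length : Int)) ("", 0)

theorem vat_some {variations : List (String × Int)} (hne : variations ≠ []) (i : Int) :
    PySem.List.pyGet? variations (PySem.Int.mod i (variations.length : Int)) =
      some (vat variations i) := by
  have hn : (0 : Int) < (variations.length : Int) := by
    have := List.length_pos_iff.mpr hne
    exact_mod_cast this
  have h0 : 0 ≤ PySem.Int.mod i (variations.length : Int) := PySem.Int.mod_nonneg _ hn
  have h1 : PySem.Int.mod i (variations.length : Int) < (variations.length : Int) :=
    PySem.Int.mod_lt _ hn
  unfold vat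
  simp [PySem.List.pyGet?, PySem.List.pyIdx?, PySem.List.pyGetD, h0, h1]

-- floor division of a value in [-n, 0) is -1
theorem floordiv_neg_small {c n : Int} (hn : 0 < n) (h1 : -n ≤ c) (h2 : c < 0) :
    PySem.Int.floordiv c n = -1 := by
  rw [PySem.Int.floordiv_eq_iff_of_pos hn]
  constructor <;> nlinarith

-- one more task changes variation j's closed-form count by exactly its round-robin hit
theorem count_step {t j n : Int} (hj0 : 0 ≤ j) (hjn : j < n) :
    PySem.Int.floordiv (t - j) n + 1 =
      (PySem.Int.floordiv (t - 1 - j) n + 1) +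
        (if PySem.Int.mod t n = j then (1 : Int) else 0) := by
  have hn : (0 : Int) < n := by omega
  have hq := PySem.Int.floordiv_mul_add_mod t n
  have hr0 : 0 ≤ PySem.Int.mod t n := PySem.Int.mod_nonneg t hn
  have hrn : PySem.Int.mod t n < n := PySem.Int.mod_lt t hn
  set q := PySem.Int.floordiv t n with hqdef
  set r := PySem.Int.mod t n with hrdef
  by_cases h : r = j
  · have e1 : PySem.Int.floordiv (t - j) n = q := by
      rw [PySem.Int.floordiv_eq_iff_of_pos hn]
      constructor <;> nlinarith
    have e2 : PySem.Int.floordiv (t - 1 - j) n = q - 1 := by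
      rw [PySem.Int.floordiv_eq_iff_of_pos hn]
      constructor <;> nlinarith
    rw [e1, e2, if_pos h]; ring
  · rw [if_neg h]
    rcases lt_or_gt_of_ne (fun hh => h hh) with hlt | hgt
    · -- r < j : both quotients are q - 1
      have e1 : PySem.Int.floordiv (t - j) n = q - 1 := by
        rw [PySem.Int.floordiv_eq_iff_of_pos hn]
        constructor <;> nlinarith
      have e2 : PySem.Int.floordiv (t - 1 - j) n = q - 1 := by
        rw [PySem.Int.floordiv_eq_iff_of_pos hn]
        constructor <;> nlinarith
      rw [e1, e2]; omega
    · -- r > j : both quotients are q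
      have e1 : PySem.Int.floordiv (t - j) n = q := by
        rw [PySem.Int.floordiv_eq_iff_of_pos hn]
        constructor <;> nlinarith
      have e2 : PySem.Int.floordiv (t - 1 - j) n = q := by
        rw [PySem.Int.floordiv_eq_iff_of_pos hn]
        constructor <;> nlinarith
      rw [e1, e2]; omega

-- B's loop: lookup in the final stats dict is the old value plus the filtered sum
theorem getD_fold_add (f : Int × (String × Int) → Int) :
    ∀ (l : List (Int × (String × Int))) (d : PySem.Dict String Int) (k : String),
      (l.foldl (fun st q => st.modify q.2.1 0 (· + f q)) d).getD k 0 =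
        d.getD k 0 + ((l.filter (fun q => q.2.1 == k)).map f).sum := by
  intro l
  induction l with
  | nil => intro d k; simp
  | cons a rest ih =>
    intro d k
    rw [List.foldl_cons, ih]
    rw [PySem.Dict.getD_modify]
    by_cases h : k = a.2.1
    · subst h
      rw [if_pos rfl, List.filter_cons, if_pos (by simp)]
      simp; ring
    · rw [if_neg h, List.filter_cons,
        if_neg (by simp only [beq_iff_eq]; exact fun hh => h hh.symm)]

-- counting a guarded hit on a duplicate-free list
theorem countP_beq_nodup (c : Int → Bool) :
    ∀ (l : List Int) (m : Int), l.Nodup →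
      l.countP (fun j => j == m && c j) = if m ∈ l ∧ c m then 1 else 0 := by
  intro l
  induction l with
  | nil => intro m _; simp
  | cons a rest ih =>
    intro m hnd
    rw [List.countP_cons, ih m hnd.of_cons]
    by_cases ha : a = m
    · subst ha
      have : a ∉ rest := (List.nodup_cons.mp hnd).1
      by_cases hc : c a = true
      · simp [this, hc]
      · simp [this, hc]
    · have : ((a == m) && c a) = false := by simp [ha]
      simp only [this, Bool.false_eq_true, if_false, Nat.add_zero, List.mem_cons]
      by_cases hm : m ∈ rest ∧ c m = true
      · rw [if_pos hm, if_pos ⟨Or.inr hm.1, hm.2⟩]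
      · rw [if_neg hm, if_neg ?_]
        rintro ⟨hm1 | hm1, hm2⟩
        · exact ha hm1.symm
        · exact hm ⟨hm1, hm2⟩

-- updating a set with elements it already has leaves it unchanged
theorem set_update_of_mem {α : Type} [BEq α] [LawfulBEq α] :
    ∀ (xs : List α) (s : PySem.Set α), (∀ x ∈ xs, x ∈ s) → PySem.Set.update s xs = s := by
  intro xs
  induction xs with
  | nil => intro s _; rfl
  | cons a rest ih =>
    intro s h
    have ha : PySem.Set.add s a = s := by
      unfold PySem.Set.add
      rw [if_pos]
      simp [PySem.Set.contains]
      exact h a (by simp)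
    show PySem.Set.update (PySem.Set.add s a) rest = s
    rw [ha]
    exact ih s (fun x hx => h x (by simp [hx]))

-- CORE: tasks hitting name k among the first t round-robin positions = B's closed-form total
theorem count_eq_closed (variations : List (String × Int)) (hne : variations ≠ []) :
    ∀ (t : Nat) (k : String),
      ((((PySem.List.pyRange 0 (t : Int) 1).map (fun i => (vat variations i).1)).count k : Int)) =
        (((PySem.List.enumerate variations).filter (fun q => q.2.1 == k)).map
          (fun q => PySem.Int.floordiv ((t : Int) - 1 - q.1) (variations.length : Int) + 1)).sum := by
  have hn : (0 : Int) < (variations.length : Int) := by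
    have := List.length_pos_iff.mpr hne
    exact_mod_cast this
  have hidx : ∀ (k : String), ∀ q ∈ (PySem.List.enumerate variations).filter (fun q => q.2.1 == k),
      0 ≤ q.1 ∧ q.1 < (variations.length : Int) := by
    intro k q hq
    have hq' := (List.mem_filter.mp hq).1
    obtain ⟨j, hj, rfl⟩ := (PySem.List.mem_enumerate_iff _ _ _).mp hq'
    simp; omega
  intro t
  induction t with
  | zero =>
    intro k
    rw [PySem.List.pyRange_one_eq_nil (by norm_num)]
    simp only [List.map_nil, List.count_nil, Nat.cast_zero]
    symm
    apply List.sum_eq_zero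
    intro x hx
    obtain ⟨q, hq, rfl⟩ := List.mem_map.mp hx
    obtain ⟨h0, h1⟩ := hidx k q hq
    have h2 : PySem.Int.floordiv (0 - 1 - q.1) (variations.length : Int) = -1 :=
      floordiv_neg_small (c := 0 - 1 - q.1) hn (by omega) (by omega)
    rw [h2]; ring
  | succ t ih =>
    intro k
    have hcast : (((t + 1 : Nat)) : Int) = (t : Int) + 1 := by push_cast; ring
    rw [hcast, PySem.List.pyRange_one_succ_right (by positivity)]
    rw [List.map_append, List.count_append]
    -- split each closed-form term into its value at t and the hit indicator at position t
    have hsplit : (((PySem.List.enumerate variations).filter (fun q => q.2.1 == k)).map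
        (fun q => PySem.Int.floordiv ((t : Int) + 1 - 1 - q.1) (variations.length : Int) + 1)) =
        (((PySem.List.enumerate variations).filter (fun q => q.2.1 == k)).map
          (fun q => (PySem.Int.floordiv ((t : Int) - 1 - q.1) (variations.length : Int) + 1) +
            (if (q.1 == PySem.Int.mod (t : Int) (variations.length : Int)) = true then (1 : Int) else 0))) := by
      apply List.map_congr_left
      intro q hq
      obtain ⟨h0, h1⟩ := hidx k q hq
      have := count_step (t := (t : Int)) (j := q.1) (n := (variations.length : Int)) h0 h1
      have harg : (t : Int) + 1 - 1 - q.1 = (t : Int) - q.1 := by ring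
      rw [harg, this]
      congr 1
      by_cases h : PySem.Int.mod (t : Int) (variations.length : Int) = q.1
      · rw [if_pos h, if_pos (by simp [h])]
      · rw [if_neg h, if_neg (by simp only [beq_iff_eq]; exact fun hh => h hh.symm)]
    rw [hsplit, PySem.List.sum_map_add_int, ← ih k]
    -- the indicator sum is exactly the count of the one position-t variation, if its name is k
    have hind : (((PySem.List.enumerate variations).filter (fun q => q.2.1 == k)).map
        (fun q => (if (q.1 == PySem.Int.mod (t : Int) (variations.length : Int)) = true then (1 : Int) else 0))).sum
        = ((List.count k [(vat variations (t : Int)).1] : Nat) : Int) := by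
      rw [PySem.List.sum_map_ite_one_zero]
      rw [List.countP_filter]
      rw [PySem.List.enumerate_eq_map_pyRange variations ("", 0)]
      rw [List.countP_map]
      -- adjust the composed predicate shape
      have hcomp : (List.countP
          ((fun q => q.1 == PySem.Int.mod (t : Int) (variations.length : Int) && q.2.1 == k) ∘
            fun j => (j, PySem.List.pyGetD variations j ("", 0)))
          (PySem.List.pyRange 0 (PySem.List.len variations))) =
          List.countP (fun j => j == PySem.Int.mod (t : Int) (variations.length : Int) &&
            (PySem.List.pyGetD variations j ("", 0)).1 == k)
            (PySem.List.pyRange 0 (PySem.List.len variations)) := by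
        apply List.countP_congr
        intro j _
        simp
      rw [hcomp]
      rw [countP_beq_nodup (fun j => (PySem.List.pyGetD variations j ("", 0)).1 == k) _ _
        (PySem.List.nodup_pyRange_one _ _)]
      have hm0 : 0 ≤ PySem.Int.mod (t : Int) (variations.length : Int) :=
        PySem.Int.mod_nonneg _ hn
      have hm1 : PySem.Int.mod (t : Int) (variations.length : Int) < (variations.length : Int) :=
        PySem.Int.mod_lt _ hn
      have hmem : PySem.Int.mod (t : Int) (variations.length : Int) ∈
          PySem.List.pyRange 0 (PySem.List.len variations) := by
        rw [PySem.List.mem_pyRange_one]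
        refine ⟨hm0, ?_⟩
        simpa [PySem.List.len] using hm1
      by_cases hk : (vat variations (t : Int)).1 = k
      · rw [if_pos ⟨hmem, by simp [vat] at hk ⊢; exact hk⟩]
        simp [hk]
      · rw [if_neg (by rintro ⟨-, hc⟩; exact hk (by simpa [vat] using (beq_iff_eq.mp hc)))]
        simp [hk]
    rw [hind]
    simp

-- ===== VERDICT (by name: the statement is the Claim_ definition above) =====
theorem get_coverage_stats_spec : Claim_equal_get_coverage_stats := by
  unfold Claim_equal_get_coverage_stats Spec_get_coverage_stats Pre_get_coverage_stats
  intro task_ids variations _ hnd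
  by_cases hvne : variations = []
  · subst hvne
    simp [get_coverage_stats, get_coverage_stats_alt, pvDistribute, PySem.Dict.values,
      PySem.List.enumerate]
  · unfold get_coverage_stats get_coverage_stats_alt
    dsimp only
    set stats0 : PySem.Dict String Int :=
      variations.foldl (fun st p => st.insert p.1 0) (PySem.Dict.mk []) with hstats0
    have hn : (0 : Int) < (variations.length : Int) := by
      have := List.length_pos_iff.mpr hvne
      exact_mod_cast this
    -- keys of stats0
    have hkeys0 : stats0.keys = PySem.Set.ofList (variations.map (·.1)) := by
      rw [hstats0, PySem.Dict.keys_foldl_insert_key variations (·.1) (fun _ _ => 0)]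
      rfl
    have hnk0 : stats0.keys.Nodup := by
      rw [hstats0]
      exact PySem.Dict.nodup_keys_foldl_insert_key variations (·.1) (fun _ _ => 0) _ (by simp)
    have hmem0 : ∀ x ∈ variations.map (·.1), x ∈ stats0.keys := by
      intro x hx
      rw [hkeys0, PySem.Set.mem_ofList]
      exact hx
    -- names that the distribution assigns, position by position
    set s := PySem.List.sorted task_ids (fun x => x) false with hs
    have hslen : s.length = task_ids.length := (PySem.List.sorted_perm task_ids _ _).length_eq
    have hsnd : s.Nodup := (PySem.List.sorted_perm task_ids (fun x => x) false).nodup_iff.mpr hnd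
    set namesA := (PySem.List.pyRange 0 (task_ids.length : Int) 1).map
      (fun i => (vat variations i).1) with hnamesA
    have hvat_mem : ∀ i : Int, vat variations i ∈ variations := by
      intro i
      have h0 : 0 ≤ PySem.Int.mod i (variations.length : Int) := PySem.Int.mod_nonneg _ hn
      have h1 : PySem.Int.mod i (variations.length : Int) < (variations.length : Int) :=
        PySem.Int.mod_lt _ hn
      unfold vat
      rw [PySem.List.pyGetD_eq_getElem _ _ h0 h1]
      exact List.getElem_mem _
    have hnamesA_mem : ∀ x ∈ namesA, x ∈ stats0.keys := by
      intro x hx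
      obtain ⟨i, _, rfl⟩ := List.mem_map.mp hx
      exact hmem0 _ (List.mem_map.mpr ⟨_, hvat_mem i, rfl⟩)
    -- A's distribution: a fold of fresh inserts over the enumerated sorted list
    have hdist : pvDistribute task_ids variations =
        (PySem.List.enumerate s).foldl
          (fun result p =>
            match PySem.List.pyGet? variations (PySem.Int.mod p.1 (variations.length : Int)) with
            | some v => result.insert p.2 [v]
            | none => result)
          (PySem.Dict.mk []) := by
      unfold pvDistribute
      by_cases hte : task_ids = []
      · rw [if_pos (Or.inl hte)]
        have : s = [] := by rw [hs, hte]; rfl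
        rw [this]
        rfl
      · rw [if_neg (by simp [hte, hvne])]
    have hbody : (PySem.List.enumerate s).foldl
          (fun result p =>
            match PySem.List.pyGet? variations (PySem.Int.mod p.1 (variations.length : Int)) with
            | some v => result.insert p.2 [v]
            | none => result)
          (PySem.Dict.mk []) =
        (PySem.List.enumerate s).foldl
          (fun result p => result.insert p.2 [vat variations p.1]) (PySem.Dict.mk []) := by
      apply PySem.List.foldl_congr_mem
      intro acc q hq
      rw [vat_some hvne]
    have hitems : (pvDistribute task_ids variations).items =
        (PySem.List.enumerate s).map (fun q => (q.2, [vat variations q.1])) := by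
      rw [hdist, hbody]
      have := PySem.Dict.items_foldl_insert_fresh (PySem.List.enumerate s)
        (fun q => q.2) (fun q => [vat variations q.1]) (PySem.Dict.mk [])
        (fun a _ => by rfl)
        (by rw [PySem.List.map_snd_enumerate]; exact hsnd)
      simpa using this
    have hvals : (pvDistribute task_ids variations).values =
        (PySem.List.enumerate s).map (fun q => [vat variations q.1]) := by
      show (pvDistribute task_ids variations).items.map (·.2) = _
      rw [hitems, List.map_map]
      rfl
    -- A's stats loop is a plain counter over namesA
    have hAfold : ((pvDistribute task_ids variations).values).foldl
          (fun st assigned => assigned.foldl (fun st v => st.modify v.1 0 (· + 1)) st) stats0 =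
        namesA.foldl (fun st x => st.modify x 0 (· + 1)) stats0 := by
      rw [hvals, List.foldl_map]
      have h1 : (PySem.List.enumerate s).foldl
          (fun st q => [vat variations q.1].foldl (fun st v => st.modify v.1 0 (· + 1)) st)
          stats0 =
          (PySem.List.enumerate s).foldl
            (fun st q => st.modify (vat variations q.1).1 0 (· + 1)) stats0 := by
        apply PySem.List.foldl_congr_mem
        intro acc q _
        simp
      rw [h1, hnamesA]
      rw [List.foldl_map]
      have h2 : ((PySem.List.enumerate s).map (fun q => q.1)).foldl
          (fun st i => st.modify (vat variations i).1 0 (· + 1)) stats0 =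
          (PySem.List.enumerate s).foldl
            (fun st q => st.modify (vat variations q.1).1 0 (· + 1)) stats0 := by
        rw [List.foldl_map]
      rw [← h2, PySem.List.map_fst_enumerate]
      simp [hslen]
    rw [hAfold]
    -- both final dicts have stats0's keys, with nodup keys
    set dA := namesA.foldl (fun st x => st.modify x 0 (· + 1)) stats0 with hdA
    set dB := (PySem.List.enumerate variations).foldl
      (fun st q => st.modify q.2.1 0
        (· + (PySem.Int.floordiv ((task_ids.length : Int) - 1 - q.1) (variations.length : Int) + 1)))
      stats0 with hdB
    have hkA : dA.keys = stats0.keys := by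
      rw [hdA, PySem.Dict.keys_foldl_modify namesA 0 (fun _ _ => (· + 1))]
      exact set_update_of_mem _ _ hnamesA_mem
    have hkB : dB.keys = stats0.keys := by
      rw [hdB, PySem.Dict.keys_foldl_modify_key (PySem.List.enumerate variations)
        (fun q => q.2.1) 0
        (fun _ q => (· + (PySem.Int.floordiv ((task_ids.length : Int) - 1 - q.1)
          (variations.length : Int) + 1)))]
      apply set_update_of_mem
      intro x hx
      obtain ⟨q, hq, rfl⟩ := List.mem_map.mp hx
      obtain ⟨j, hj, rfl⟩ := (PySem.List.mem_enumerate_iff _ _ _).mp hq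
      exact hmem0 _ (List.mem_map.mpr ⟨_, List.getElem_mem _, rfl⟩)
    -- pointwise value agreement via the closed-form counting lemma
    have hgd : ∀ k : String, dA.getD k 0 = dB.getD k 0 := by
      intro k
      rw [hdA, PySem.Dict.getD_foldl_modify_add_one]
      rw [hdB, getD_fold_add]
      congr 1
      rw [hnamesA]
      exact count_eq_closed variations hvne task_ids.length k
    rw [PySem.Dict.items_eq_map_keys dA (by rw [hkA]; exact hnk0) 0,
        PySem.Dict.items_eq_map_keys dB (by rw [hkB]; exact hnk0) 0,
        hkA, hkB]
    apply List.map_congr_left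
    intro k _
    rw [hgd k]
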